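-- pv_equiv track=rewrite | github.com/waldohidalgo/geek-for-geeks-100daysofcodechallenge | BonusProblem/103Stack/4Sum of Max of Subarrays.py | sumOfMax
-- ===== SOURCE A (Python) =====
-- def sumOfMax(arr):
--     # code here
--     n=len(arr)
--     left=[0]*n
--
--     stack=[]
--     for i in range(n):
--         while stack and arr[stack[-1]]<arr[i]:
--             stack.pop()
--         left[i]=i-stack[-1] if stack else i+1
--         stack.append(i)
--
--     stack.clear()
--     right=[0]*n
--     # aca considero los iguales pero arriba no ya que ya fueron considerados
--     for i in range(n-1,-1,-1):
--         while stack and arr[stack[-1]]<=arr[i]: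
--             stack.pop()
--         right[i]=stack[-1]-i  if stack else n-i
--         stack.append(i)
--
--     count=0
--     for i in range(n):
--         count+=arr[i]*left[i]*right[i]
--
--     return count
-- ===== SOURCE B (Python) =====
-- def sumOfMax(arr):
--     # Naive accumulation: for each start index keep a running maximum while
--     # extending the subarray to the right, adding it each step.
--     n = len(arr)
--     total = 0
--     for i in range(n):
--         m = arr[i]
--         for j in range(i, n):
--             m = max(m, arr[j])
--             total += m
--     return total
-- ===== Notes on version B (the rewrite author's own statement) =====
-- stated objective: simpler
-- what changed: Replaces the two monotonic-stack passes that compute each element's left/right contribution spans by a direct double loop that maintains a running maximum of each extending subarray and sums it.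
import Mathlib
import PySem

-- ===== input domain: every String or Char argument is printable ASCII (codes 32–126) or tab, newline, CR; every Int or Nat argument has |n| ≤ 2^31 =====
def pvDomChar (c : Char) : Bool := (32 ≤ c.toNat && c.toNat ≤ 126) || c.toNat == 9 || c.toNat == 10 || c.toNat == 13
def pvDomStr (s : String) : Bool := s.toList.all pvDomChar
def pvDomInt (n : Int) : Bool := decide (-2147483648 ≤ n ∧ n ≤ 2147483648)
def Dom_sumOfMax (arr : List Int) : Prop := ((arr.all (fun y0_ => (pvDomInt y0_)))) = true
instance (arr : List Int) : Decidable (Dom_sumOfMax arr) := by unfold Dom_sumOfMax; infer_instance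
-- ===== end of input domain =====

-- B replaces A's two monotonic-stack contribution passes by the direct double loop
-- with a running maximum (simpler code, same exact sum; A is O(n), B is O(n^2)).

-- ===== PORT A =====
-- 'while stack and arr[stack[-1]] < arr[i]: stack.pop()'  (stack head = Python stack[-1];
-- all stacked indices are in range, so 'arr.getD · 0' is exact for 'arr[·]')
def popL (arr : List Int) (x : Int) : List Nat → List Nat
  | [] => []
  | t :: rest => if arr.getD t 0 < x then popL arr x rest else t :: rest

-- 'while stack and arr[stack[-1]] <= arr[i]: stack.pop()'
def popR (arr : List Int) (x : Int) : List Nat → List Nat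
  | [] => []
  | t :: rest => if arr.getD t 0 ≤ x then popR arr x rest else t :: rest

-- 'i-stack[-1] if stack else i+1'
def vL (i : Nat) (stack : List Nat) : Int :=
  match stack with
  | t :: _ => (i : Int) - (t : Int)
  | [] => (i : Int) + 1

-- 'stack[-1]-i if stack else n-i'
def vR (arr : List Int) (i : Nat) (stack : List Nat) : Int :=
  match stack with
  | t :: _ => (t : Int) - (i : Int)
  | [] => (arr.length : Int) - (i : Int)

-- one iteration of the first 'for i in range(n)' loop: state = (left, stack)
def stepL (arr : List Int) (st : List Int × List Nat) (i : Nat) : List Int × List Nat :=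
  let stack := popL arr (arr.getD i 0) st.2
  (st.1 ++ [vL i stack], i :: stack)

-- one iteration of the 'for i in range(n-1,-1,-1)' loop: state = (right, stack);
-- right is filled at descending i, i.e. built by prepending
def stepR (arr : List Int) (st : List Int × List Nat) (i : Nat) : List Int × List Nat :=
  let stack := popR arr (arr.getD i 0) st.2
  (vR arr i stack :: st.1, i :: stack)

def sumOfMax (arr : List Int) : Int :=
  let n := arr.length
  let left := ((List.range n).foldl (stepL arr) ([], [])).1
  let right := ((List.range n).reverse.foldl (stepR arr) ([], [])).1
  (List.range n).foldl (fun c i => c + arr.getD i 0 * left.getD i 0 * right.getD i 0) 0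

-- ===== PORT B =====
-- naive double loop: inner state = (m, total), m the running maximum
def sumOfMax_alt (arr : List Int) : Int :=
  let n := arr.length
  (List.range n).foldl (fun total i =>
    ((List.range' i (n - i)).foldl
        (fun (p : Int × Int) j =>
          let m := max p.1 (arr.getD j 0)
          (m, p.2 + m))
        (arr.getD i 0, total)).2) 0

-- ===== PRECONDITION & SPEC =====
def Spec_sumOfMax (arr : List Int) (out : Int) : Prop := out = sumOfMax_alt arr
instance (arr : List Int) (out : Int) : Decidable (Spec_sumOfMax arr out) := by unfold Spec_sumOfMax; infer_instance

-- ===== CLAIM (what is proved, stated in full; the proofs are below) =====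
def Claim_equal_sumOfMax : Prop := ∀ (arr : List Int), Dom_sumOfMax arr → Spec_sumOfMax arr (sumOfMax arr)

-- ===== LEMMAS AND PROOFS =====

-- maximum of arr[s..s+d]
def maxR (arr : List Int) (s : Nat) : Nat → Int
  | 0 => arr.getD s 0
  | d+1 => max (maxR arr s d) (arr.getD (s+d+1) 0)

-- first position of the maximum of arr[s..s+d]
def argF (arr : List Int) (s : Nat) : Nat → Nat
  | 0 => s
  | d+1 => if maxR arr s d < arr.getD (s+d+1) 0 then s+d+1 else argF arr s d

-- start positions s ≤ i from which arr[i] is the first maximum (left span of i)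
def LcntF (arr : List Int) (i : Nat) : Finset ℕ :=
  (Finset.range (i+1)).filter (fun s => ∀ t ∈ Finset.Ico s i, arr.getD t 0 < arr.getD i 0)

-- end positions e ≥ i up to which arr[i] is the first maximum (right span of i)
def RcntF (arr : List Int) (i : Nat) : Finset ℕ :=
  (Finset.Ico i arr.length).filter (fun e => ∀ t ∈ Finset.Ioc i e, arr.getD t 0 ≤ arr.getD i 0)

-- invariant of the left stack after processing 0..i-1
def InvL (arr : List Int) (i : Nat) (stack : List Nat) : Prop :=
  (∀ j ∈ stack, j < i ∧ ∀ t, j < t → t < i → arr.getD t 0 ≤ arr.getD j 0) ∧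
  (∀ j, j < i → (∀ t, j < t → t < i → arr.getD t 0 ≤ arr.getD j 0) → j ∈ stack) ∧
  List.Pairwise (· > ·) stack

-- invariant of the right stack after processing n-1..m
def InvR (arr : List Int) (m : Nat) (stack : List Nat) : Prop :=
  (∀ j ∈ stack, m ≤ j ∧ j < arr.length ∧ ∀ t, m ≤ t → t < j → arr.getD t 0 < arr.getD j 0) ∧
  (∀ j, m ≤ j → j < arr.length → (∀ t, m ≤ t → t < j → arr.getD t 0 < arr.getD j 0) → j ∈ stack) ∧
  List.Pairwise (· < ·) stack

lemma popL_eq_dropWhile (arr : List Int) (x : Int) (l : List Nat) :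
    popL arr x l = l.dropWhile (fun t => decide (arr.getD t 0 < x)) := by
  induction l with
  | nil => rfl
  | cons t rest ih =>
    simp only [popL, List.dropWhile]
    by_cases h : arr.getD t 0 < x
    · rw [if_pos h, decide_eq_true h, ih]
    · rw [if_neg h, decide_eq_false h]

lemma popR_eq_dropWhile (arr : List Int) (x : Int) (l : List Nat) :
    popR arr x l = l.dropWhile (fun t => decide (arr.getD t 0 ≤ x)) := by
  induction l with
  | nil => rfl
  | cons t rest ih =>
    simp only [popR, List.dropWhile]
    by_cases h : arr.getD t 0 ≤ x
    · rw [if_pos h, decide_eq_true h, ih]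
    · rw [if_neg h, decide_eq_false h]

lemma dropWhile_head_not {α : Type} (p : α → Bool) :
    ∀ (l : List α) (t : α) (r : List α), l.dropWhile p = t :: r → p t = false := by
  intro l; induction l with
  | nil => intro t r h; simp [List.dropWhile] at h
  | cons a l ih =>
    intro t r h
    by_cases ha : p a
    · simp [List.dropWhile, ha] at h; exact ih t r h
    · simp [List.dropWhile, ha] at h
      rcases h with ⟨h1, _⟩; subst h1; simpa using ha

-- total sum of subarray maxima, the common value of both programs
def SA (arr : List Int) : Int :=
  ∑ s ∈ Finset.range arr.length, ∑ d ∈ Finset.range (arr.length - s), maxR arr s d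

lemma B_inner (arr : List Int) (s : Nat) : ∀ (k : Nat) (t : Int),
    (List.range' s k).foldl
        (fun (p : Int × Int) j => let m := max p.1 (arr.getD j 0); (m, p.2 + m))
        (arr.getD s 0, t)
      = (maxR arr s (k-1), t + ∑ d ∈ Finset.range k, maxR arr s d) := by
  intro k
  induction k with
  | zero => intro t; simp [maxR]
  | succ k ih =>
    intro t
    have hc : List.range' s (k+1) = List.range' s k ++ [s + k] := by
      simpa using (List.range'_concat (s := s) (n := k) (step := 1))
    rw [hc, List.foldl_append, ih]
    simp only [List.foldl_cons, List.foldl_nil]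
    have hm : max (maxR arr s (k-1)) (arr.getD (s+k) 0) = maxR arr s k := by
      cases k with
      | zero => simp [maxR]
      | succ j =>
        show max (maxR arr s j) _ = maxR arr s (j+1)
        rw [show s + (j+1) = s + j + 1 by omega]
        rfl
    rw [Finset.sum_range_succ, hm]
    simp [add_assoc]

lemma B_eq (arr : List Int) : sumOfMax_alt arr = SA arr := by
  show (List.range arr.length).foldl _ 0 = _
  have main : ∀ (m : Nat),
      (List.range m).foldl (fun total i =>
        ((List.range' i (arr.length - i)).foldl
            (fun (p : Int × Int) j => let m := max p.1 (arr.getD j 0); (m, p.2 + m))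
            (arr.getD i 0, total)).2) 0
      = ∑ s ∈ Finset.range m, ∑ d ∈ Finset.range (arr.length - s), maxR arr s d := by
    intro m
    induction m with
    | zero => simp
    | succ m ih =>
      rw [List.range_succ, List.foldl_append, ih, Finset.sum_range_succ]
      simp only [List.foldl_cons, List.foldl_nil]
      rw [B_inner]
  exact main arr.length


-- ----- properties of maxR / argF -----

lemma arg_bounds (arr : List Int) (s : Nat) : ∀ d, s ≤ argF arr s d ∧ argF arr s d ≤ s + d := by
  intro d
  induction d with
  | zero => simp [argF]
  | succ d ih => simp only [argF]; split_ifs with h <;> omega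

lemma g_arg (arr : List Int) (s : Nat) : ∀ d, arr.getD (argF arr s d) 0 = maxR arr s d := by
  intro d
  induction d with
  | zero => rfl
  | succ d ih =>
    simp only [argF, maxR]
    split_ifs with h
    · exact (max_eq_right (le_of_lt h)).symm
    · rw [ih, max_eq_left (not_lt.1 h)]

lemma maxR_ge (arr : List Int) (s : Nat) : ∀ d t, s ≤ t → t ≤ s + d → arr.getD t 0 ≤ maxR arr s d := by
  intro d
  induction d with
  | zero =>
    intro t h1 h2
    have : t = s := by omega
    subst this; exact le_refl _
  | succ d ih =>
    intro t h1 h2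
    simp only [maxR]
    by_cases ht : t = s + d + 1
    · subst ht; exact le_max_right _ _
    · exact le_trans (ih t h1 (by omega)) (le_max_left _ _)

lemma arg_left (arr : List Int) (s : Nat) :
    ∀ d t, s ≤ t → t < argF arr s d → arr.getD t 0 < arr.getD (argF arr s d) 0 := by
  intro d
  induction d with
  | zero => intro t h1 h2; simp only [argF] at h2; omega
  | succ d ih =>
    intro t h1 h2
    simp only [argF] at h2 ⊢
    split_ifs with h
    · rw [if_pos h] at h2
      exact lt_of_le_of_lt (maxR_ge arr s d t h1 (by omega)) h
    · rw [if_neg h] at h2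
      exact ih t h1 h2

lemma arg_right (arr : List Int) (s : Nat) :
    ∀ d t, argF arr s d < t → t ≤ s + d → arr.getD t 0 ≤ arr.getD (argF arr s d) 0 := by
  intro d
  induction d with
  | zero => intro t h1 h2; simp only [argF] at h1; omega
  | succ d ih =>
    intro t h1 h2
    simp only [argF] at h1 ⊢
    split_ifs with h
    · rw [if_pos h] at h1; omega
    · rw [if_neg h] at h1
      by_cases ht : t = s + d + 1
      · subst ht
        rw [g_arg]
        exact not_lt.1 h
      · exact ih t h1 (by omega)

lemma arg_unique (arr : List Int) (s d i : Nat) (h1 : s ≤ i) (h2 : i ≤ s + d)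
    (hl : ∀ t, s ≤ t → t < i → arr.getD t 0 < arr.getD i 0)
    (hr : ∀ t, i < t → t ≤ s + d → arr.getD t 0 ≤ arr.getD i 0) : i = argF arr s d := by
  rcases lt_trichotomy i (argF arr s d) with h | h | h
  · have ha := arg_left arr s d i h1 h
    have hb := hr (argF arr s d) h (arg_bounds arr s d).2
    linarith
  · exact h
  · have ha := arg_right arr s d i h h2
    have hb := hl (argF arr s d) (arg_bounds arr s d).1 h
    linarith

lemma arg_iff (arr : List Int) (s d i : Nat) (hd : s + d < arr.length) :
    argF arr s d = i ↔ (s ∈ LcntF arr i ∧ s + d ∈ RcntF arr i) := by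
  constructor
  · rintro rfl
    refine ⟨Finset.mem_filter.2 ⟨Finset.mem_range.2 (by have := (arg_bounds arr s d).1; omega), ?_⟩,
            Finset.mem_filter.2 ⟨Finset.mem_Ico.2 ⟨(arg_bounds arr s d).2, hd⟩, ?_⟩⟩
    · intro t ht
      have := Finset.mem_Ico.1 ht
      exact arg_left arr s d t this.1 this.2
    · intro t ht
      have := Finset.mem_Ioc.1 ht
      exact arg_right arr s d t this.1 (by omega)
  · rintro ⟨hL, hR⟩
    obtain ⟨hL1, hL2⟩ := Finset.mem_filter.1 hL
    obtain ⟨hR1, hR2⟩ := Finset.mem_filter.1 hR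
    have hsi : s ≤ i := by have := Finset.mem_range.1 hL1; omega
    have his : i ≤ s + d := (Finset.mem_Ico.1 hR1).1
    refine (arg_unique arr s d i hsi his ?_ ?_).symm
    · intro t ht1 ht2; exact hL2 t (Finset.mem_Ico.2 ⟨ht1, ht2⟩)
    · intro t ht1 ht2; exact hR2 t (Finset.mem_Ioc.2 ⟨ht1, ht2⟩)

-- ----- the contribution count equals the sum of subarray maxima -----

lemma count_eq (arr : List Int) :
    SA arr = ∑ i ∈ Finset.range arr.length,
      arr.getD i 0 * ((LcntF arr i).card : Int) * ((RcntF arr i).card : Int) := by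
  calc SA arr
      = ∑ s ∈ Finset.range arr.length, ∑ d ∈ Finset.range (arr.length - s),
          arr.getD (argF arr s d) 0 := by
        unfold SA
        refine Finset.sum_congr rfl fun s _ => Finset.sum_congr rfl fun d _ => (g_arg arr s d).symm
    _ = ∑ s ∈ Finset.range arr.length, ∑ d ∈ Finset.range (arr.length - s),
          ∑ i ∈ Finset.range arr.length, (if argF arr s d = i then arr.getD i 0 else 0) := by
        refine Finset.sum_congr rfl fun s hs => Finset.sum_congr rfl fun d hd => ?_
        rw [Finset.sum_ite_eq, if_pos]
        apply Finset.mem_range.2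
        have h1 := (arg_bounds arr s d).2
        have h2 := Finset.mem_range.1 hd
        have h3 := Finset.mem_range.1 hs
        omega
    _ = ∑ i ∈ Finset.range arr.length, ∑ s ∈ Finset.range arr.length,
          ∑ d ∈ Finset.range (arr.length - s), (if argF arr s d = i then arr.getD i 0 else 0) :=
        (Finset.sum_congr rfl fun s _ => Finset.sum_comm).trans Finset.sum_comm
    _ = ∑ i ∈ Finset.range arr.length,
          arr.getD i 0 * ((LcntF arr i).card : Int) * ((RcntF arr i).card : Int) := by
        refine Finset.sum_congr rfl fun i hi => ?_
        have hin := Finset.mem_range.1 hi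
        have hstep : ∀ s ∈ Finset.range arr.length,
            (∑ d ∈ Finset.range (arr.length - s), (if argF arr s d = i then arr.getD i 0 else 0))
            = (if s ∈ LcntF arr i then ((RcntF arr i).card : Int) * arr.getD i 0 else 0) := by
          intro s hs
          have hs' := Finset.mem_range.1 hs
          by_cases hsL : s ∈ LcntF arr i
          · rw [if_pos hsL]
            have hsi : s ≤ i := by
              have := Finset.mem_range.1 (Finset.mem_filter.1 hsL).1; omega
            have hR : (∑ e ∈ Finset.Ico s arr.length,
                (if e ∈ RcntF arr i then arr.getD i 0 else 0))
                = ((RcntF arr i).card : Int) * arr.getD i 0 := by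
              rw [Finset.sum_ite_mem, Finset.inter_eq_right.mpr ?_, Finset.sum_const, nsmul_eq_mul]
              intro e he
              have h1 := Finset.mem_Ico.1 (Finset.mem_filter.1 he).1
              exact Finset.mem_Ico.2 ⟨by omega, h1.2⟩
            rw [← hR, Finset.sum_Ico_eq_sum_range]
            refine Finset.sum_congr rfl fun d hd => ?_
            have hdn : s + d < arr.length := by have := Finset.mem_range.1 hd; omega
            have hiff := arg_iff arr s d i hdn
            by_cases h : argF arr s d = i
            · rw [if_pos h, if_pos (hiff.1 h).2]
            · rw [if_neg h, if_neg (fun hc => h (hiff.2 ⟨hsL, hc⟩))]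
          · rw [if_neg hsL]
            refine Finset.sum_eq_zero fun d hd => ?_
            have hdn : s + d < arr.length := by have := Finset.mem_range.1 hd; omega
            rw [if_neg]
            intro h
            exact hsL ((arg_iff arr s d i hdn).1 h).1
        rw [Finset.sum_congr rfl hstep, Finset.sum_ite_mem, Finset.inter_eq_right.mpr ?_,
            Finset.sum_const, nsmul_eq_mul]
        · ring
        · intro sx hsx
          have := Finset.mem_range.1 (Finset.mem_filter.1 hsx).1
          exact Finset.mem_range.2 (by omega)

-- ----- the left stack pass -----

lemma stepL_main (arr : List Int) (i : Nat) (stack stack' : List Nat)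
    (hInv : InvL arr i stack) (hpop : popL arr (arr.getD i 0) stack = stack') :
    InvL arr (i+1) (i :: stack') ∧ vL i stack' = ((LcntF arr i).card : Int) := by
  obtain ⟨P1, P2, P3⟩ := hInv
  have hdw : stack.dropWhile (fun t => decide (arr.getD t 0 < arr.getD i 0)) = stack' := by
    rw [← popL_eq_dropWhile]; exact hpop
  have hsl : stack'.Sublist stack := hdw ▸ List.dropWhile_sublist _
  have hsub : ∀ j ∈ stack', j ∈ stack := fun j hj => hsl.subset hj
  have hpw' : List.Pairwise (· > ·) stack' := P3.sublist hsl
  have htake : ∀ j ∈ stack.takeWhile (fun t => decide (arr.getD t 0 < arr.getD i 0)),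
      arr.getD j 0 < arr.getD i 0 := fun j hj => by simpa using List.mem_takeWhile_imp hj
  have hsplit : stack.takeWhile (fun t => decide (arr.getD t 0 < arr.getD i 0)) ++ stack' = stack := by
    rw [← hdw]; exact List.takeWhile_append_dropWhile
  have hmax : ∀ j0, j0 < i → arr.getD i 0 ≤ arr.getD j0 0 →
      ∃ j ∈ stack', j0 ≤ j ∧ j < i ∧ arr.getD i 0 ≤ arr.getD j 0 := by
    intro j0 h0 hg0
    set S := (Finset.Ico j0 i).filter (fun j => arr.getD i 0 ≤ arr.getD j 0) with hS
    have hne : S.Nonempty :=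
      ⟨j0, Finset.mem_filter.2 ⟨Finset.mem_Ico.2 ⟨le_refl _, h0⟩, hg0⟩⟩
    obtain ⟨hjI, hjg⟩ := Finset.mem_filter.1 (S.max'_mem hne)
    obtain ⟨hj0, hji⟩ := Finset.mem_Ico.1 hjI
    have hjstack : S.max' hne ∈ stack := by
      refine P2 _ hji fun t ht hti => ?_
      by_cases hgt : arr.getD i 0 ≤ arr.getD t 0
      · exfalso
        have htS : t ∈ S := Finset.mem_filter.2 ⟨Finset.mem_Ico.2 ⟨by omega, hti⟩, hgt⟩
        have := S.le_max' t htS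
        omega
      · push_neg at hgt
        exact le_of_lt (lt_of_lt_of_le hgt hjg)
    have : S.max' hne ∈ stack' := by
      rw [← hsplit] at hjstack
      rcases List.mem_append.1 hjstack with hc | hc
      · exact absurd (htake _ hc) (not_lt.2 hjg)
      · exact hc
    exact ⟨S.max' hne, this, hj0, hji, hjg⟩
  have hge : ∀ j ∈ stack', arr.getD i 0 ≤ arr.getD j 0 := by
    cases hst : stack' with
    | nil => intro j hj; cases hj
    | cons t r =>
      have hti : arr.getD i 0 ≤ arr.getD t 0 := by
        have := dropWhile_head_not _ stack t r (by rw [hdw, hst])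
        simpa using this
      intro j hj
      rcases List.mem_cons.1 hj with rfl | hr'
      · exact hti
      · have htj : t > j := (List.pairwise_cons.1 (hst ▸ hpw')).1 j hr'
        have hjmem : j ∈ stack := hsub j (hst ▸ List.mem_cons_of_mem t hr')
        have htmem : t ∈ stack := hsub t (hst ▸ List.mem_cons_self)
        have hti' : t < i := (P1 t htmem).1
        have := (P1 j hjmem).2 t htj hti'
        linarith
  have hInvNew : InvL arr (i+1) (i :: stack') := by
    refine ⟨?_, ?_, ?_⟩
    · intro j hj
      rcases List.mem_cons.1 hj with rfl | hj'
      · exact ⟨Nat.lt_succ_self _, fun u hu1 hu2 => by omega⟩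
      · have hjst := hsub j hj'
        obtain ⟨hji, hPj⟩ := P1 j hjst
        refine ⟨by omega, fun u hu1 hu2 => ?_⟩
        rcases Nat.lt_succ_iff_lt_or_eq.1 hu2 with hu | rfl
        · exact hPj u hu1 hu
        · exact hge j hj'
    · intro j hj hcond
      rcases Nat.lt_succ_iff_lt_or_eq.1 hj with hj' | rfl
      · have hjstack : j ∈ stack := P2 j hj' fun u hu1 hu2 => hcond u hu1 (by omega)
        have hgej : arr.getD i 0 ≤ arr.getD j 0 := hcond i hj' (Nat.lt_succ_self _)
        rw [← hsplit] at hjstack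
        rcases List.mem_append.1 hjstack with hc | hc
        · exact absurd (htake _ hc) (not_lt.2 hgej)
        · exact List.mem_cons_of_mem i hc
      · exact List.mem_cons_self
    · exact List.pairwise_cons.2 ⟨fun j hj => (P1 j (hsub j hj)).1, hpw'⟩
  refine ⟨hInvNew, ?_⟩
  cases hst : stack' with
  | nil =>
    have hnone : ∀ j, j < i → arr.getD j 0 < arr.getD i 0 := by
      intro j hj
      by_contra h
      push_neg at h
      obtain ⟨j', hj', _⟩ := hmax j hj h
      rw [hst] at hj'
      cases hj'
    have hL : LcntF arr i = Finset.range (i+1) :=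
      Finset.filter_true_of_mem fun s _ t ht => hnone t (Finset.mem_Ico.1 ht).2
    show (i : Int) + 1 = _
    rw [hL, Finset.card_range]
    push_cast
    ring
  | cons t r =>
    have htmem : t ∈ stack := hsub t (hst ▸ List.mem_cons_self)
    have hti : t < i := (P1 t htmem).1
    have htge : arr.getD i 0 ≤ arr.getD t 0 := hge t (hst ▸ List.mem_cons_self)
    have hbetween : ∀ j, t < j → j < i → arr.getD j 0 < arr.getD i 0 := by
      intro j hjt hji
      by_contra h
      push_neg at h
      obtain ⟨j', hj'mem, hj'ge, hj'i, hj'g⟩ := hmax j hji h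
      rw [hst] at hj'mem
      rcases List.mem_cons.1 hj'mem with rfl | hr'
      · omega
      · have := (List.pairwise_cons.1 (hst ▸ hpw')).1 j' hr'
        omega
    have hL : LcntF arr i = Finset.Ioc t i := by
      ext s
      simp only [LcntF, Finset.mem_filter, Finset.mem_range, Finset.mem_Ioc]
      constructor
      · rintro ⟨hs1, hs2⟩
        refine ⟨?_, by omega⟩
        by_contra hle
        push_neg at hle
        have := hs2 t (Finset.mem_Ico.2 ⟨hle, hti⟩)
        linarith
      · rintro ⟨hts, hsi⟩
        refine ⟨by omega, fun u hu => ?_⟩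
        have := Finset.mem_Ico.1 hu
        exact hbetween u (by omega) this.2
    show (i : Int) - (t : Int) = _
    rw [hL, Nat.card_Ioc]
    omega

lemma getD_snoc_self (l : List Int) (v : Int) : (l ++ [v]).getD l.length 0 = v := by
  simp [List.getD_eq_getElem?_getD]

lemma getD_snoc_of_len (l : List Int) (v : Int) {m : Nat} (h : l.length = m) :
    (l ++ [v]).getD m 0 = v := by
  subst h; exact getD_snoc_self l v

lemma foldL_spec (arr : List Int) : ∀ m,
    ((List.range m).foldl (stepL arr) ([], [])).1.length = m ∧
    (∀ i, i < m → ((List.range m).foldl (stepL arr) ([], [])).1.getD i 0 = ((LcntF arr i).card : Int)) ∧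
    InvL arr m ((List.range m).foldl (stepL arr) ([], [])).2 := by
  intro m
  induction m with
  | zero =>
    refine ⟨rfl, by omega, ?_⟩
    exact ⟨by simp, fun j hj => by omega, by simp⟩
  | succ m ih =>
    obtain ⟨ihl, ihv, ihInv⟩ := ih
    rw [List.range_succ, List.foldl_append]
    simp only [List.foldl_cons, List.foldl_nil, stepL]
    obtain ⟨hInv', hval⟩ := stepL_main arr m
      ((List.range m).foldl (stepL arr) ([], [])).2
      (popL arr (arr.getD m 0) ((List.range m).foldl (stepL arr) ([], [])).2) ihInv rfl
    refine ⟨?_, ?_, ?_⟩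
    · simp only [List.length_append, List.length_cons, List.length_nil]
      omega
    · intro i hi
      rcases Nat.lt_succ_iff_lt_or_eq.1 hi with hi' | rfl
      · rw [List.getD_append _ _ _ _ (by rw [ihl]; exact hi')]
        exact ihv i hi'
      · rw [getD_snoc_of_len _ _ ihl]
        exact hval
    · exact hInv'

-- ----- the right stack pass -----

lemma stepR_main (arr : List Int) (m : Nat) (stack stack' : List Nat)
    (hInv : InvR arr (m+1) stack) (hm : m < arr.length)
    (hpop : popR arr (arr.getD m 0) stack = stack') :
    InvR arr m (m :: stack') ∧ vR arr m stack' = ((RcntF arr m).card : Int) := by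
  obtain ⟨P1, P2, P3⟩ := hInv
  have hdw : stack.dropWhile (fun t => decide (arr.getD t 0 ≤ arr.getD m 0)) = stack' := by
    rw [← popR_eq_dropWhile]; exact hpop
  have hsl : stack'.Sublist stack := hdw ▸ List.dropWhile_sublist _
  have hsub : ∀ j ∈ stack', j ∈ stack := fun j hj => hsl.subset hj
  have hpw' : List.Pairwise (· < ·) stack' := P3.sublist hsl
  have htake : ∀ j ∈ stack.takeWhile (fun t => decide (arr.getD t 0 ≤ arr.getD m 0)),
      arr.getD j 0 ≤ arr.getD m 0 := fun j hj => by simpa using List.mem_takeWhile_imp hj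
  have hsplit : stack.takeWhile (fun t => decide (arr.getD t 0 ≤ arr.getD m 0)) ++ stack' = stack := by
    rw [← hdw]; exact List.takeWhile_append_dropWhile
  have hmin : ∀ j0, m < j0 → j0 < arr.length → arr.getD m 0 < arr.getD j0 0 →
      ∃ j ∈ stack', j ≤ j0 ∧ m < j ∧ arr.getD m 0 < arr.getD j 0 := by
    intro j0 h0 h0n hg0
    set S := (Finset.Ioc m j0).filter (fun j => arr.getD m 0 < arr.getD j 0) with hS
    have hne : S.Nonempty :=
      ⟨j0, Finset.mem_filter.2 ⟨Finset.mem_Ioc.2 ⟨h0, le_refl _⟩, hg0⟩⟩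
    obtain ⟨hjI, hjg⟩ := Finset.mem_filter.1 (S.min'_mem hne)
    obtain ⟨hmj, hjj0⟩ := Finset.mem_Ioc.1 hjI
    have hjstack : S.min' hne ∈ stack := by
      refine P2 _ (by omega) (by omega) fun t ht htj => ?_
      by_cases hgt : arr.getD m 0 < arr.getD t 0
      · exfalso
        have htS : t ∈ S := Finset.mem_filter.2 ⟨Finset.mem_Ioc.2 ⟨by omega, by omega⟩, hgt⟩
        have := S.min'_le t htS
        omega
      · push_neg at hgt
        exact lt_of_le_of_lt hgt hjg
    have : S.min' hne ∈ stack' := by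
      rw [← hsplit] at hjstack
      rcases List.mem_append.1 hjstack with hc | hc
      · exact absurd (htake _ hc) (not_le.2 hjg)
      · exact hc
    exact ⟨S.min' hne, this, hjj0, hmj, hjg⟩
  have hgt' : ∀ j ∈ stack', arr.getD m 0 < arr.getD j 0 := by
    cases hst : stack' with
    | nil => intro j hj; cases hj
    | cons t r =>
      have htm : arr.getD m 0 < arr.getD t 0 := by
        have := dropWhile_head_not _ stack t r (by rw [hdw, hst])
        simpa using this
      intro j hj
      rcases List.mem_cons.1 hj with rfl | hr'
      · exact htm
      · have htj : t < j := (List.pairwise_cons.1 (hst ▸ hpw')).1 j hr'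
        have hjmem : j ∈ stack := hsub j (hst ▸ List.mem_cons_of_mem t hr')
        have htmem : t ∈ stack := hsub t (hst ▸ List.mem_cons_self)
        have ht1 := P1 t htmem
        have := (P1 j hjmem).2.2 t ht1.1 htj
        linarith
  have hInvNew : InvR arr m (m :: stack') := by
    refine ⟨?_, ?_, ?_⟩
    · intro j hj
      rcases List.mem_cons.1 hj with rfl | hj'
      · exact ⟨le_refl _, hm, fun u hu1 hu2 => by omega⟩
      · have hjst := hsub j hj'
        obtain ⟨hj1, hj2, hPj⟩ := P1 j hjst
        refine ⟨by omega, hj2, fun u hu1 hu2 => ?_⟩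
        rcases Nat.lt_or_ge u (m+1) with hu | hu
        · have : u = m := by omega
          subst this
          exact hgt' j hj'
        · exact hPj u hu hu2
    · intro j hj1 hj2 hcond
      rcases Nat.lt_or_ge m j with hj' | hj'
      · have hjstack : j ∈ stack := P2 j (by omega) hj2 fun u hu1 hu2 => hcond u (by omega) hu2
        have hgtj : arr.getD m 0 < arr.getD j 0 := hcond m (le_refl _) hj'
        rw [← hsplit] at hjstack
        rcases List.mem_append.1 hjstack with hc | hc
        · exact absurd (htake _ hc) (not_le.2 hgtj)
        · exact List.mem_cons_of_mem m hc
      · have : j = m := by omega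
        subst this
        exact List.mem_cons_self
    · refine List.pairwise_cons.2 ⟨fun j hj => ?_, hpw'⟩
      have := (P1 j (hsub j hj)).1
      omega
  refine ⟨hInvNew, ?_⟩
  cases hst : stack' with
  | nil =>
    have hnone : ∀ j, m < j → j < arr.length → arr.getD j 0 ≤ arr.getD m 0 := by
      intro j hj hjn
      by_contra h
      push_neg at h
      obtain ⟨j', hj', _⟩ := hmin j hj hjn h
      rw [hst] at hj'
      cases hj'
    have hR : RcntF arr m = Finset.Ico m arr.length :=
      Finset.filter_true_of_mem fun e he t ht => by
        have h1 := Finset.mem_Ioc.1 ht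
        have h2 := Finset.mem_Ico.1 he
        exact hnone t h1.1 (by omega)
    show (arr.length : Int) - (m : Int) = _
    rw [hR, Nat.card_Ico]
    omega
  | cons t r =>
    have htmem : t ∈ stack := hsub t (hst ▸ List.mem_cons_self)
    obtain ⟨htm, htn, _⟩ := P1 t htmem
    have htgt : arr.getD m 0 < arr.getD t 0 := hgt' t (hst ▸ List.mem_cons_self)
    have hbetween : ∀ j, m < j → j < t → arr.getD j 0 ≤ arr.getD m 0 := by
      intro j hjm hjt
      by_contra h
      push_neg at h
      obtain ⟨j', hj'mem, hj'le, hj'm, hj'g⟩ := hmin j hjm (by omega) h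
      rw [hst] at hj'mem
      rcases List.mem_cons.1 hj'mem with rfl | hr'
      · omega
      · have := (List.pairwise_cons.1 (hst ▸ hpw')).1 j' hr'
        omega
    have hR : RcntF arr m = Finset.Ico m t := by
      ext e
      simp only [RcntF, Finset.mem_filter, Finset.mem_Ico]
      constructor
      · rintro ⟨⟨he1, he2⟩, he3⟩
        refine ⟨he1, ?_⟩
        by_contra hle
        push_neg at hle
        have := he3 t (Finset.mem_Ioc.2 ⟨by omega, hle⟩)
        linarith
      · rintro ⟨hme, het⟩
        refine ⟨⟨hme, by omega⟩, fun u hu => ?_⟩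
        have := Finset.mem_Ioc.1 hu
        exact hbetween u (by omega) (by omega)
    show (t : Int) - (m : Int) = _
    rw [hR, Nat.card_Ico]
    omega

lemma foldR_spec (arr : List Int) : ∀ k, k ≤ arr.length →
    ((List.range' (arr.length - k) k).reverse.foldl (stepR arr) ([], [])).1.length = k ∧
    (∀ i, arr.length - k ≤ i → i < arr.length →
      ((List.range' (arr.length - k) k).reverse.foldl (stepR arr) ([], [])).1.getD
        (i - (arr.length - k)) 0 = ((RcntF arr i).card : Int)) ∧
    InvR arr (arr.length - k) ((List.range' (arr.length - k) k).reverse.foldl (stepR arr) ([], [])).2 := by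
  intro k
  induction k with
  | zero =>
    intro _
    refine ⟨rfl, by omega, ?_⟩
    exact ⟨by simp, fun j hj1 hj2 => by omega, by simp⟩
  | succ k ih =>
    intro hk
    obtain ⟨ihl, ihv, ihInv⟩ := ih (by omega)
    have hmk : arr.length - k = (arr.length - (k+1)) + 1 := by omega
    have hrr : (List.range' (arr.length - (k+1)) (k+1)).reverse
        = (List.range' (arr.length - k) k).reverse ++ [arr.length - (k+1)] := by
      rw [List.range'_succ, ← hmk]
      simp
    rw [hrr, List.foldl_append]
    simp only [List.foldl_cons, List.foldl_nil, stepR]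
    have ihInv' : InvR arr ((arr.length - (k+1)) + 1)
        ((List.range' (arr.length - k) k).reverse.foldl (stepR arr) ([], [])).2 := by
      rw [← hmk]; exact ihInv
    obtain ⟨hInv', hval⟩ := stepR_main arr (arr.length - (k+1))
      ((List.range' (arr.length - k) k).reverse.foldl (stepR arr) ([], [])).2
      (popR arr (arr.getD (arr.length - (k+1)) 0)
        ((List.range' (arr.length - k) k).reverse.foldl (stepR arr) ([], [])).2)
      ihInv' (by omega) rfl
    refine ⟨?_, ?_, ?_⟩
    · simp only [List.length_cons]
      omega
    · intro i hi1 hi2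
      rcases Nat.eq_or_lt_of_le hi1 with heq | hlt
      · rw [← heq, Nat.sub_self, List.getD_cons_zero]
        exact hval
      · have hidx : i - (arr.length - (k+1)) = (i - (arr.length - k)) + 1 := by omega
        rw [hidx, List.getD_cons_succ]
        exact ihv i (by omega) hi2
    · exact hInv'

-- ----- assembling the two programs -----

lemma final_fold (arr left right : List Int) : ∀ (m : Nat) (c : Int),
    (List.range m).foldl (fun c i => c + arr.getD i 0 * left.getD i 0 * right.getD i 0) c
    = c + ∑ i ∈ Finset.range m, arr.getD i 0 * left.getD i 0 * right.getD i 0 := by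
  intro m
  induction m with
  | zero => intro c; simp
  | succ m ih =>
    intro c
    rw [List.range_succ, List.foldl_append, ih, Finset.sum_range_succ]
    simp [add_assoc]

lemma foldR_all (arr : List Int) (i : Nat) (h : i < arr.length) :
    ((List.range arr.length).reverse.foldl (stepR arr) ([], [])).1.getD i 0
      = ((RcntF arr i).card : Int) := by
  have h2 := (foldR_spec arr arr.length (le_refl _)).2.1 i (by omega) h
  simp only [Nat.sub_self, Nat.sub_zero] at h2
  rw [List.range_eq_range']
  exact h2

lemma A_eq (arr : List Int) :
    sumOfMax arr = ∑ i ∈ Finset.range arr.length,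
      arr.getD i 0 * ((LcntF arr i).card : Int) * ((RcntF arr i).card : Int) := by
  obtain ⟨_, hLv, _⟩ := foldL_spec arr arr.length
  show (List.range arr.length).foldl _ 0 = _
  rw [final_fold, zero_add]
  refine Finset.sum_congr rfl fun i hi => ?_
  have hin := Finset.mem_range.1 hi
  rw [hLv i hin, foldR_all arr i hin]

-- ===== VERDICT (by name: the statement is the Claim_ definition above) =====
theorem sumOfMax_spec : Claim_equal_sumOfMax := by
  intro arr _
  unfold Spec_sumOfMax
  rw [A_eq arr, B_eq arr, count_eq arr]
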